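-- pv_equiv track=rewrite | github.com/modrzejewski/gammcor-integrals | src/integrals/Auto2e/Auto2eGlobal.py | SplitLine
-- ===== SOURCE A (Python) =====
-- def SplitLine(line, delims, indent=3, TargetSize=80, CommentLine=False):
--     FormattedLine = ""
--     CurrentBlock = ""
--     for x in line:
--         if x in delims:
--             if len(CurrentBlock) >= TargetSize:
--                 FormattedLine += CurrentBlock + " &\n"
--                 CurrentBlock = " "*indent + x
--                 if CommentLine:
--                     CurrentBlock = "!" + CurrentBlock
--             else:
--                 CurrentBlock += x
--         else:
--             CurrentBlock += x
--     FormattedLine += CurrentBlock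
--     return FormattedLine
-- ===== SOURCE B (Python) =====
-- def SplitLine(line, delims, indent=3, TargetSize=80, CommentLine=False):
--     # Pass 1: tokenize into pieces; pieces[0] is everything before the first
--     # delimiter, each later piece is a delimiter plus the non-delimiters after it.
--     pieces = []
--     buf = ""
--     for x in line:
--         if x in delims:
--             pieces.append(buf)
--             buf = x
--         else:
--             buf += x
--     pieces.append(buf)
--     # Pass 2: greedy wrap over pieces.
--     result = ""
--     cur = pieces[0]
--     for p in pieces[1:]:
--         if len(cur) >= TargetSize:
--             result += cur + " &\n"
--             cur = ("!" if CommentLine else "") + " " * indent + p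
--         else:
--             cur += p
--     return result + cur
-- ===== Notes on version B (the rewrite author's own statement) =====
-- stated objective: alternative
-- what changed: Replaced A's single char-by-char loop that decides breaks at each delimiter with a two-pass tokenize-then-wrap: first split the line into pieces (head piece, then delimiter-led pieces), then greedily wrap whole pieces.
import Mathlib
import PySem

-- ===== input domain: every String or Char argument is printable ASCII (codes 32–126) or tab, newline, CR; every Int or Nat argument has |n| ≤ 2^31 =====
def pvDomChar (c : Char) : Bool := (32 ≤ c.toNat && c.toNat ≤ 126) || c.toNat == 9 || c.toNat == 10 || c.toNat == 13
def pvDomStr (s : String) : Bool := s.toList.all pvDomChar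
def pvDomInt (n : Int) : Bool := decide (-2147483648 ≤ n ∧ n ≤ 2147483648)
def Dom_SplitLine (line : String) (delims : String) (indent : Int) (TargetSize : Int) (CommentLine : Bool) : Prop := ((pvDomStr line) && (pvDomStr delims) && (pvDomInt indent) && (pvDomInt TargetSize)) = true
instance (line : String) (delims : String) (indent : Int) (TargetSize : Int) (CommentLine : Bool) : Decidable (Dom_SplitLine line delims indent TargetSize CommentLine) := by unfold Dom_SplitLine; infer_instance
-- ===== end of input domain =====

-- B replaces A's single char-by-char loop by a two-pass tokenize-then-greedy-wrap over pieces (objective: alternative decomposition, same cost).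


-- ===== PORT A =====
def pvAStep (delims : List Char) (indent : Int) (TargetSize : Int) (CommentLine : Bool)
    (st : List Char × List Char) (x : Char) : List Char × List Char :=
  if delims.contains x then
    if TargetSize ≤ (st.2.length : Int) then
      let fl := st.1 ++ st.2 ++ [' ', '&', '\n']
      let cb := List.replicate indent.toNat ' ' ++ [x]
      let cb := if CommentLine then '!' :: cb else cb
      (fl, cb)
    else (st.1, st.2 ++ [x])
  else (st.1, st.2 ++ [x])

def SplitLine (line : String) (delims : String) (indent : Int) (TargetSize : Int) (CommentLine : Bool) : String :=
  let st := line.toList.foldl (pvAStep delims.toList indent TargetSize CommentLine) ([], [])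
  String.ofList (st.1 ++ st.2)

-- ===== PORT B =====
-- pass 1 of B: tokenizing step (the loop building `pieces`)
def pvTokStep (delims : List Char) (st : List (List Char) × List Char) (x : Char) :
    List (List Char) × List Char :=
  if delims.contains x then (st.1 ++ [st.2], [x]) else (st.1, st.2 ++ [x])

-- pass 2 of B: greedy wrapping step over whole pieces
def pvBStep (indent : Int) (CommentLine : Bool) (TargetSize : Int)
    (st : List Char × List Char) (p : List Char) : List Char × List Char :=
  if TargetSize ≤ (st.2.length : Int) then
    (st.1 ++ st.2 ++ [' ', '&', '\n'],
     ((if CommentLine then ['!'] else []) ++ List.replicate indent.toNat ' ') ++ p)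
  else (st.1, st.2 ++ p)

def SplitLine_alt (line : String) (delims : String) (indent : Int) (TargetSize : Int) (CommentLine : Bool) : String :=
  let tk := line.toList.foldl (pvTokStep delims.toList) ([], [])
  let pieces := tk.1 ++ [tk.2]
  match pieces with
  | [] => ""            -- unreachable: pieces always nonempty
  | p0 :: rest =>
      let st := rest.foldl (pvBStep indent CommentLine TargetSize) ([], p0)
      String.ofList (st.1 ++ st.2)

-- ===== PRECONDITION & SPEC =====
def Spec_SplitLine (line : String) (delims : String) (indent : Int) (TargetSize : Int) (CommentLine : Bool) (out : String) : Prop := out = SplitLine_alt line delims indent TargetSize CommentLine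
instance (line : String) (delims : String) (indent : Int) (TargetSize : Int) (CommentLine : Bool) (out : String) : Decidable (Spec_SplitLine line delims indent TargetSize CommentLine out) := by unfold Spec_SplitLine; infer_instance

-- ===== CLAIM (what is proved, stated in full; the proofs are below) =====
def Claim_equal_SplitLine : Prop := ∀ (line : String) (delims : String) (indent : Int) (TargetSize : Int) (CommentLine : Bool), Dom_SplitLine line delims indent TargetSize CommentLine → Spec_SplitLine line delims indent TargetSize CommentLine (SplitLine line delims indent TargetSize CommentLine)

-- ===== LEMMAS AND PROOFS =====

-- recursive characterisation of B's tokenizer: (head piece from buffer `cur`, later pieces)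
def pvTokRec (delims : List Char) : List Char → List Char → List Char × List (List Char)
  | cur, [] => (cur, [])
  | cur, x :: xs =>
    if delims.contains x then
      let r := pvTokRec delims [x] xs
      (cur, r.1 :: r.2)
    else pvTokRec delims (cur ++ [x]) xs

theorem pvTok_fold (delims : List Char) (cs : List Char) :
    ∀ (ps : List (List Char)) (cur : List Char),
    (let st := cs.foldl (pvTokStep delims) (ps, cur)
     st.1 ++ [st.2]) = ps ++ (pvTokRec delims cur cs).1 :: (pvTokRec delims cur cs).2 := by
  induction cs with
  | nil => intro ps cur; simp [pvTokRec]
  | cons x xs ih =>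
    intro ps cur
    simp only [List.foldl_cons, pvTokStep, pvTokRec]
    by_cases h : x ∈ delims <;> simp [h, ih]

theorem pvTokRec_shift (delims : List Char) (cs : List Char) :
    ∀ (a b : List Char),
    pvTokRec delims (a ++ b) cs = ((a ++ (pvTokRec delims b cs).1, (pvTokRec delims b cs).2)) := by
  induction cs with
  | nil => intro a b; simp [pvTokRec]
  | cons x xs ih =>
    intro a b
    simp only [pvTokRec]
    by_cases h : x ∈ delims
    · simp [h]
    · simpa [h, List.append_assoc] using ih a (b ++ [x])

-- key invariant: A's char loop from state (F, buf) equals B's piece loop over the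
-- tokenization of the remaining characters with buffer `buf`.
theorem pvKey (delims : List Char) (indent TargetSize : Int) (CommentLine : Bool)
    (cs : List Char) :
    ∀ (F buf : List Char),
    cs.foldl (pvAStep delims indent TargetSize CommentLine) (F, buf)
      = (pvTokRec delims buf cs).2.foldl
          (pvBStep indent CommentLine TargetSize)
          (F, (pvTokRec delims buf cs).1) := by
  induction cs with
  | nil => intro F buf; simp [pvTokRec]
  | cons x xs ih =>
    intro F buf
    simp only [List.foldl_cons, pvAStep, pvTokRec]
    by_cases h : x ∈ delims
    · simp only [List.contains_eq_mem, h, decide_true, if_true]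
      by_cases hl : TargetSize ≤ (buf.length : Int)
      · simp only [hl, if_true]
        rw [ih]
        have hcb : (if CommentLine then '!' :: (List.replicate indent.toNat ' ' ++ [x])
              else List.replicate indent.toNat ' ' ++ [x])
            = ((if CommentLine then ['!'] else []) ++ List.replicate indent.toNat ' ') ++ [x] := by
          cases CommentLine <;> simp
        rw [hcb, pvTokRec_shift]
        simp [pvBStep, hl]
      · simp only [hl, if_false]
        rw [ih, pvTokRec_shift]
        simp [pvBStep, hl]
    · simp [h, ih]

theorem SplitLine_spec : Claim_equal_SplitLine := by
  intro line delims indent TargetSize CommentLine _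
  unfold Spec_SplitLine SplitLine SplitLine_alt
  have htok := pvTok_fold delims.toList line.toList [] []
  have hkey := pvKey delims.toList indent TargetSize CommentLine line.toList [] []
  simp only [List.nil_append] at htok
  dsimp only
  rw [hkey, htok]
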